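-- pv_equiv track=rewrite | github.com/samuller/advent-of-code | 2023/day14/main.py | find_loops_at_end
-- ===== SOURCE A (Python) =====
-- def find_loops_at_end(history):
--     # min_loop_len = len(history)
--     # max_loop_len = 0
--     for loop_len in range(1, len(history)//2):
--         part1 = history[-loop_len:]
--         part2 = history[-2*loop_len:-loop_len]
--         assert len(part1) == len(part2), len(history)
--         if part1 == part2:
--             return loop_len
--             # min_loop_len = min(min_loop_len, loop_len)
--             # max_loop_len = max(max_loop_len, loop_len)
--     return None
-- ===== SOURCE B (Python) =====
-- def find_loops_at_end(history):
--     # Reverse the history, compute its Z-array in linear time, and return the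
--     # first p in [1, len//2) with z[p] >= p (i.e. last p elements == previous p).
--     s = history[::-1]
--     n = len(s)
--     z = [0] * n
--     l = r = 0
--     for i in range(1, n):
--         zi = min(r - i, z[i - l]) if i < r else 0
--         while i + zi < n and s[zi] == s[i + zi]:
--             zi += 1
--         z[i] = zi
--         if i + zi > r:
--             l, r = i, i + zi
--     for p in range(1, len(history) // 2):
--         if z[p] >= p:
--             return p
--     return None
-- ===== Notes on version B (the rewrite author's own statement) =====
-- stated objective: faster
-- what changed: Replaces A's per-candidate slice construction and comparison (quadratic) by one linear-time Z-array of the reversed history, then a linear scan for the first p with z[p] >= p.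
import Mathlib
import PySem

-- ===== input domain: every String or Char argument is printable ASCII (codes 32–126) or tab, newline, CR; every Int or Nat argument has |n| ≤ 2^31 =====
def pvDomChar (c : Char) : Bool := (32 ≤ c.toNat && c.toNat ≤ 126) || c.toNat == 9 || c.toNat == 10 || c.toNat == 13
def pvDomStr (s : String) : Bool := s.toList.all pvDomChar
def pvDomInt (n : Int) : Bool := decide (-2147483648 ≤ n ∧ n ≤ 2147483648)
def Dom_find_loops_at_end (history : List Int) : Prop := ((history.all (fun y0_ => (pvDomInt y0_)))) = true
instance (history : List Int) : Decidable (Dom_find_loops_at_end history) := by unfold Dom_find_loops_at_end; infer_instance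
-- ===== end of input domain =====

-- B replaces A's quadratic scan (slice-compare for every candidate length) by a linear-time
-- Z-array of the reversed history; same return value everywhere (objective: faster).


-- ===== PORT A =====
-- 'for loop_len in range(1, len(history)//2)' as structural recursion on the counter.
-- A's assert always holds (both slices have length loop_len because 2*loop_len < len), so it never raises.
def loopA (history : List Int) (p : Nat) : Option Int :=
  if _h : p < history.length / 2 then
    let part1 := PySem.List.slice history (some (-(p : Int))) none                       -- history[-loop_len:]
    let part2 := PySem.List.slice history (some (-(2 * (p : Int)))) (some (-(p : Int)))  -- history[-2*loop_len:-loop_len]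
    if part1 = part2 then some (p : Int) else loopA history (p + 1)
  else none
termination_by history.length / 2 - p

def find_loops_at_end (history : List Int) : Option Int := loopA history 1

-- ===== PORT B =====
-- 'while i + zi < n and s[zi] == s[i + zi]: zi += 1'
def zExtend (s : List Int) (i k : Nat) : Nat :=
  if _h : i + k < s.length ∧ s[k]! = s[i + k]! then zExtend s i (k + 1) else k
termination_by s.length - (i + k)

-- 'for i in range(1, n)' body of the Z-algorithm, carrying the state (z, l, r)
def zLoop (s : List Int) (z : List Nat) (l r i : Nat) : List Nat :=
  if _h : i < s.length then
    let k0 := if i < r then min (r - i) (z[i - l]!) else 0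
    let zi := zExtend s i k0
    let z' := z.set i zi
    if i + zi > r then zLoop s z' i (i + zi) (i + 1) else zLoop s z' l r (i + 1)
  else z
termination_by s.length - i

-- 'for p in range(1, len(history)//2): if z[p] >= p: return p'
def loopB (z : List Nat) (half p : Nat) : Option Int :=
  if _h : p < half then
    if p ≤ z[p]! then some (p : Int) else loopB z half (p + 1)
  else none
termination_by half - p

def find_loops_at_end_alt (history : List Int) : Option Int :=
  let s := history.reverse   -- history[::-1]  (PySem.List.slice?_none_none_neg_one: xs[::-1] is xs.reverse)
  let z := zLoop s (List.replicate s.length 0) 0 0 1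
  loopB z (history.length / 2) 1

-- ===== PRECONDITION & SPEC =====
def Spec_find_loops_at_end (history : List Int) (out : Option Int) : Prop := out = find_loops_at_end_alt history
instance (history : List Int) (out : Option Int) : Decidable (Spec_find_loops_at_end history out) := by unfold Spec_find_loops_at_end; infer_instance

-- ===== CLAIM (what is proved, stated in full; the proofs are below) =====
def Claim_equal_find_loops_at_end : Prop := ∀ (history : List Int), Dom_find_loops_at_end history → Spec_find_loops_at_end history (find_loops_at_end history)

-- ===== LEMMAS AND PROOFS =====

-- length of the longest common prefix of two lists
def lcp : List Int → List Int → Nat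
  | a :: as, b :: bs => if a = b then lcp as bs + 1 else 0
  | _, _ => 0

theorem lcp_ge_iff (a : List Int) : ∀ (b : List Int) (m : Nat),
    m ≤ lcp a b ↔ m ≤ a.length ∧ m ≤ b.length ∧ a.take m = b.take m := by
  induction a with
  | nil => intro b m; simp [lcp]; intro hm; cases m with
    | zero => simp
    | succ m => omega
  | cons x as ih =>
    intro b m
    cases b with
    | nil => simp [lcp]; intro hm; omega
    | cons y bs =>
      cases m with
      | zero => simp [lcp]
      | succ m =>
        simp only [lcp, List.take_succ_cons, List.length_cons]
        by_cases hxy : x = y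
        · subst hxy
          simp only [if_pos, List.cons.injEq, true_and]
          constructor
          · intro h
            have := (ih bs m).mp (by omega)
            exact ⟨by omega, by omega, this.2.2⟩
          · intro ⟨h1, h2, h3⟩
            have := (ih bs m).mpr ⟨by omega, by omega, h3⟩
            omega
        · simp [hxy]

theorem getElem_eq_of_take_eq {a b : List Int} {m j : Nat} (hj : j < m)
    (hja : j < a.length) (hjb : j < b.length) (h : a.take m = b.take m) : a[j] = b[j] := by
  have := congrArg (fun l => l[j]?) h
  simp only [List.getElem?_take, hj, if_pos] at this
  simpa [List.getElem?_eq_getElem, hja, hjb] using this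

-- the while-loop, started at any k ≤ lcp, computes exactly the lcp of s and s.drop i
theorem zExtend_eq (s : List Int) (i : Nat) :
    ∀ d k, lcp s (s.drop i) - k = d → k ≤ lcp s (s.drop i) → zExtend s i k = lcp s (s.drop i) := by
  intro d
  induction d with
  | zero =>
    intro k hd hk
    have hkL : k = lcp s (s.drop i) := by omega
    rw [zExtend]
    rw [dif_neg]
    · exact hkL
    · rintro ⟨h1, h2⟩
      have hkn : k < s.length := by omega
      have hbounds := (lcp_ge_iff s (s.drop i) k).mp hk
      have hlen : k < (s.drop i).length := by
        simp only [List.length_drop]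
        omega
      have hk1 : k + 1 ≤ lcp s (s.drop i) := by
        apply (lcp_ge_iff s (s.drop i) (k + 1)).mpr
        refine ⟨by omega, by simp only [List.length_drop]; omega, ?_⟩
        rw [List.take_add_one, List.take_add_one, hbounds.2.2]
        congr 1
        have e1 : s[k]? = some s[k] := List.getElem?_eq_getElem hkn
        have e2 : (s.drop i)[k]? = s[i + k]? := by
          rw [List.getElem?_drop]
        have e3 : s[i + k]? = some s[i + k] := List.getElem?_eq_getElem h1
        rw [e1, e2, e3]
        rw [← getElem!_pos s k hkn, ← getElem!_pos s (i + k) h1, h2]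
      omega
  | succ d ih =>
    intro k hd hk
    have hk1 : k + 1 ≤ lcp s (s.drop i) := by omega
    have hb := (lcp_ge_iff s (s.drop i) (k + 1)).mp hk1
    have hkn : k < s.length := by omega
    have hik : i + k < s.length := by
      have := hb.2.1
      simp only [List.length_drop] at this
      omega
    have heq : s[k]! = s[i + k]! := by
      have h1 : s[k] = (s.drop i)[k]'(by simp [List.length_drop]; omega) :=
        getElem_eq_of_take_eq (by omega) hkn (by simp [List.length_drop]; omega) hb.2.2
      have h2 : (s.drop i)[k]'(by simp [List.length_drop]; omega) = s[i + k]'hik := by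
        simp [List.getElem_drop]
      rw [getElem!_pos s k hkn, getElem!_pos s (i + k) hik, h1, h2]
    rw [zExtend, dif_pos ⟨hik, heq⟩]
    exact ih (k + 1) (by omega) hk1

-- shifting the matched window [l, r) to start at i (l ≤ i ≤ r)
theorem window_shift (s : List Int) (l r i : Nat) (hl : l ≤ i) (hir : i ≤ r)
    (hwin : s.take (r - l) = (s.drop l).take (r - l)) :
    (s.drop (i - l)).take (r - i) = (s.drop i).take (r - i) := by
  have h := congrArg (fun t => (List.drop (i - l) t)) hwin
  simp only [List.drop_take, List.drop_drop] at h
  rw [show r - l - (i - l) = r - i from by omega, show l + (i - l) = i from by omega] at h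
  exact h

theorem lcp_le_len (s : List Int) (i : Nat) : lcp s (s.drop i) ≤ s.length - i := by
  have h := (lcp_ge_iff s (s.drop i) (lcp s (s.drop i))).mp le_rfl
  simp only [List.length_drop] at h
  omega

-- the Z-loop invariant: every finished entry of z holds the true lcp value
theorem zLoop_spec (s : List Int) :
    ∀ d z l r i, s.length - i = d →
    z.length = s.length → 1 ≤ i →
    (∀ j, 1 ≤ j → j < i → z[j]! = lcp s (s.drop j)) →
    (i < r → 1 ≤ l ∧ l < i ∧ r ≤ s.length ∧ s.take (r - l) = (s.drop l).take (r - l)) →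
    ∀ j, 1 ≤ j → j < s.length → (zLoop s z l r i)[j]! = lcp s (s.drop j) := by
  intro d
  induction d with
  | zero =>
    intro z l r i hd hlen hi hz hw j hj1 hj2
    rw [zLoop, dif_neg (by omega)]
    exact hz j hj1 (by omega)
  | succ d ih =>
    intro z l r i hd hlen hi hz hw j hj1 hj2
    have hin : i < s.length := by omega
    have hk0 : (if i < r then min (r - i) (z[i - l]!) else 0) ≤ lcp s (s.drop i) := by
      by_cases hir : i < r
      · obtain ⟨hl1, hli, hrn, hwin⟩ := hw hir
        have hzil : z[i - l]! = lcp s (s.drop (i - l)) := hz (i - l) (by omega) (by omega)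
        rw [if_pos hir, hzil]
        set L' := lcp s (s.drop (i - l)) with hL'
        set m := min (r - i) L' with hm
        apply (lcp_ge_iff s (s.drop i) m).mpr
        have hL'len := lcp_le_len s (i - l)
        have hlcp1 := (lcp_ge_iff s (s.drop (i - l)) m).mp (by omega)
        refine ⟨by omega, by simp only [List.length_drop]; omega, ?_⟩
        have key := window_shift s l r i (by omega) (by omega) hwin
        calc s.take m = (s.drop (i - l)).take m := hlcp1.2.2
          _ = ((s.drop (i - l)).take (r - i)).take m := by
                rw [List.take_take, min_eq_left (by omega)]
          _ = ((s.drop i).take (r - i)).take m := by rw [key]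
          _ = (s.drop i).take m := by rw [List.take_take, min_eq_left (by omega)]
      · rw [if_neg hir]; omega
    have hzi : zExtend s i (if i < r then min (r - i) (z[i - l]!) else 0) = lcp s (s.drop i) :=
      zExtend_eq s i _ _ rfl hk0
    have hLlen := lcp_le_len s i
    rw [zLoop, dif_pos hin]
    simp only [hzi]
    have hlen' : (z.set i (lcp s (s.drop i))).length = s.length := by simpa using hlen
    have hz' : ∀ j', 1 ≤ j' → j' < i + 1 →
        (z.set i (lcp s (s.drop i)))[j']! = lcp s (s.drop j') := by
      intro j' h1 h2
      by_cases hji : j' = i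
      · subst hji
        rw [getElem!_pos (z.set j' (lcp s (s.drop j'))) j' (by simp; omega)]
        simp [List.getElem_set_self]
      · rw [getElem!_pos (z.set i (lcp s (s.drop i))) j' (by simp; omega)]
        rw [List.getElem_set_ne (by omega)]
        have := hz j' h1 (by omega)
        rwa [getElem!_pos z j' (by omega)] at this
    split_ifs with hbr
    · apply ih _ i (i + lcp s (s.drop i)) (i + 1) (by omega) hlen' (by omega) hz'
      · intro h2
        refine ⟨by omega, by omega, by omega, ?_⟩
        rw [show i + lcp s (s.drop i) - i = lcp s (s.drop i) from by omega]
        exact ((lcp_ge_iff s (s.drop i) _).mp le_rfl).2.2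
      · exact hj1
      · exact hj2
    · apply ih _ l r (i + 1) (by omega) hlen' (by omega) hz'
      · intro h2
        obtain ⟨a1, a2, a3, a4⟩ := hw (by omega)
        exact ⟨a1, by omega, a3, a4⟩
      · exact hj1
      · exact hj2

-- xs[-a:-b] as drop/take (0 < b ≤ a ≤ len)
theorem slice_neg_neg (xs : List Int) (a b : Nat) (hb : 0 < b) (hab : b ≤ a) (han : a ≤ xs.length) :
    PySem.List.slice xs (some (-(a : Int))) (some (-(b : Int))) =
      (xs.drop (xs.length - a)).take (a - b) := by
  simp only [PySem.List.slice, PySem.List.clampIdx]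
  split_ifs <;> try omega
  rw [show ((xs.length : Int) + -(a : Int)).toNat = xs.length - a from by omega,
      show ((xs.length : Int) + -(b : Int)).toNat = xs.length - b from by omega,
      show xs.length - b - (xs.length - a) = a - b from by omega]

-- A's slice condition at p  ↔  B's z-condition at p, for 1 ≤ p < len/2
theorem cond_iff (history : List Int) (p : Nat) (hp : 1 ≤ p) (hp2 : p < history.length / 2) :
    (PySem.List.slice history (some (-(p : Int))) none =
       PySem.List.slice history (some (-(2 * (p : Int)))) (some (-(p : Int)))) ↔
    p ≤ lcp history.reverse (history.reverse.drop p) := by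
  have hn : 2 * p < history.length := by omega
  rw [PySem.List.slice_from_neg_natCast history p hp]
  rw [show (-(2 * (p : Int))) = -((2 * p : Nat) : Int) from by push_cast; ring]
  rw [slice_neg_neg history (2 * p) p hp (by omega) (by omega)]
  rw [lcp_ge_iff]
  have hb1 : p ≤ history.reverse.length := by simp; omega
  have hb2 : p ≤ (history.reverse.drop p).length := by simp; omega
  simp only [hb1, hb2, true_and]
  rw [List.take_reverse, List.drop_reverse, List.take_reverse]
  rw [List.drop_take, List.reverse_inj, List.length_take,
      min_eq_left (by omega : history.length - p ≤ history.length)]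
  rw [show history.length - p - p = history.length - 2 * p from by omega,
      show history.length - p - (history.length - 2 * p) = p from by omega,
      show 2 * p - p = p from by omega]

-- the two scans agree once z holds the true lcp values
theorem loops_agree (history : List Int) (z : List Nat)
    (hz : ∀ q, 1 ≤ q → q < history.length / 2 →
      z[q]! = lcp history.reverse (history.reverse.drop q)) :
    ∀ d p, history.length / 2 - p = d → 1 ≤ p →
      loopA history p = loopB z (history.length / 2) p := by
  intro d
  induction d with
  | zero =>
    intro p hd hp
    rw [loopA, dif_neg (by omega), loopB, dif_neg (by omega)]
  | succ d ih =>
    intro p hd hp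
    have hlt : p < history.length / 2 := by omega
    rw [loopA, dif_pos hlt, loopB, dif_pos hlt]
    have hc := cond_iff history p hp hlt
    rw [← hz p hp hlt] at hc
    by_cases hcond : p ≤ z[p]!
    · rw [if_pos (hc.mpr hcond), if_pos hcond]
    · rw [if_neg (fun h => hcond (hc.mp h)), if_neg hcond]
      exact ih (p + 1) (by omega) (by omega)

-- ===== VERDICT (by name: the statement is the Claim_ definition above) =====
theorem find_loops_at_end_spec : Claim_equal_find_loops_at_end := by
  intro history _
  unfold Spec_find_loops_at_end find_loops_at_end find_loops_at_end_alt
  apply loops_agree history _ _ (history.length / 2 - 1) 1 rfl le_rfl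
  intro q hq1 hq2
  have hqlen : q < history.reverse.length := by simp; omega
  exact zLoop_spec history.reverse (history.reverse.length - 1)
    (List.replicate history.reverse.length 0) 0 0 1 rfl (by simp) le_rfl
    (by intro j h1 h2; omega) (by omega) q hq1 hqlen
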